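-- pv_equiv track=rewrite | github.com/Coreymillia/MotionSense-Pi | app/sensehat.py | _idle_pixels
-- ===== SOURCE A (Python) =====
-- def _idle_pixels(step: int) -> list[tuple[int, int, int]]:
--     pixels = [(0, 0, 0)] * 64
--     trail = [36, 18, 8]
--     for offset, blue_level in enumerate(trail):
--         column = (step - offset) % 8
--         for row in range(8):
--             pixels[(row * 8) + column] = (0, 0, blue_level)
--     return pixels
-- ===== SOURCE B (Python) =====
-- def _idle_pixels(step: int) -> list[tuple[int, int, int]]:
--     level = {(step - o) % 8: b for o, b in enumerate((36, 18, 8))}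
--     return [(0, 0, level.get(i % 8, 0)) for i in range(64)]
-- ===== Notes on version B (the rewrite author's own statement) =====
-- stated objective: simpler
-- what changed: Replaces the scatter (nested trail-by-row writes into a pre-zeroed mutable grid) with a column-to-blue lookup table built once and a single gather comprehension over every cell of the grid.
import Mathlib
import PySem

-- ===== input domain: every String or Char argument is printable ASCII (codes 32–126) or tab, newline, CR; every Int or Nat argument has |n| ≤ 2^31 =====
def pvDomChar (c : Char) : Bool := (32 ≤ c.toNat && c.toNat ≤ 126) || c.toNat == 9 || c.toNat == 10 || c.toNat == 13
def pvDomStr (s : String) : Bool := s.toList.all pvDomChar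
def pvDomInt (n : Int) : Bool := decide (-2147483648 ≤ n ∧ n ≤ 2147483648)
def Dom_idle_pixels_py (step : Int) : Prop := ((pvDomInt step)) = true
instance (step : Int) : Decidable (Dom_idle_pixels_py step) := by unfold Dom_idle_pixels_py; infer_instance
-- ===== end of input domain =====

-- B replaces A's nested scatter-writes into a pre-zeroed grid with a column->blue
-- lookup table built once, followed by a single gather over all 64 cells (simpler).

-- ===== PORT A =====
def idle_pixels_py (step : Int) : List (Int × Int × Int) :=
  let pixels := List.replicate 64 ((0 : Int), (0 : Int), (0 : Int))
  let trail : List Int := [36, 18, 8]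
  (PySem.List.enumerate trail).foldl (fun pixels ob =>
    let column := PySem.Int.mod (step - ob.1) 8
    (PySem.List.pyRange 0 8 1).foldl (fun pixels row =>
      PySem.List.pySetD pixels (row * 8 + column) ((0 : Int), (0 : Int), ob.2)) pixels) pixels

-- ===== PORT B =====
def idle_pixels_py_alt (step : Int) : List (Int × Int × Int) :=
  let level : PySem.Dict Int Int :=
    PySem.Dict.ofList ((PySem.List.enumerate [(36 : Int), 18, 8]).map
      (fun ob => (PySem.Int.mod (step - ob.1) 8, ob.2)))
  (PySem.List.pyRange 0 64 1).map
    (fun i => ((0 : Int), (0 : Int), level.getD (PySem.Int.mod i 8) 0))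

-- ===== PRECONDITION & SPEC =====
def Spec_idle_pixels_py (step : Int) (out : List (Int × Int × Int)) : Prop := out = idle_pixels_py_alt step
instance (step : Int) (out : List (Int × Int × Int)) : Decidable (Spec_idle_pixels_py step out) := by unfold Spec_idle_pixels_py; infer_instance

-- ===== CLAIM (what is proved, stated in full; the proofs are below) =====
def Claim_equal_idle_pixels_py : Prop := ∀ (step : Int), Dom_idle_pixels_py step → Spec_idle_pixels_py step (idle_pixels_py step)

-- ===== LEMMAS AND PROOFS =====

-- Both programs depend on step only through step % 8.
theorem idle_pixels_py_mod (s t : Int) (h : s % 8 = t % 8) :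
    idle_pixels_py s = idle_pixels_py t := by
  have e : ∀ o : Int, PySem.Int.mod (s - o) 8 = PySem.Int.mod (t - o) 8 := by
    intro o
    rw [PySem.Int.mod_eq_emod_of_pos (by omega), PySem.Int.mod_eq_emod_of_pos (by omega)]
    omega
  simp only [idle_pixels_py, e]

theorem idle_pixels_py_alt_mod (s t : Int) (h : s % 8 = t % 8) :
    idle_pixels_py_alt s = idle_pixels_py_alt t := by
  have e : ∀ o : Int, PySem.Int.mod (s - o) 8 = PySem.Int.mod (t - o) 8 := by
    intro o
    rw [PySem.Int.mod_eq_emod_of_pos (by omega), PySem.Int.mod_eq_emod_of_pos (by omega)]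
    omega
  simp only [idle_pixels_py_alt, e]

set_option maxRecDepth 4096 in
theorem idle_pixels_eq_on_residue (r : Int) (h0 : 0 ≤ r) (h8 : r < 8) :
    idle_pixels_py r = idle_pixels_py_alt r := by
  interval_cases r <;> decide

-- ===== VERDICT (by name: the statement is the Claim_ definition above) =====
theorem idle_pixels_py_spec : Claim_equal_idle_pixels_py := by
  intro step _
  show idle_pixels_py step = idle_pixels_py_alt step
  have h0 : 0 ≤ step % 8 := Int.emod_nonneg _ (by norm_num)
  have h8 : step % 8 < 8 := Int.emod_lt_of_pos _ (by norm_num)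
  rw [idle_pixels_py_mod step (step % 8) (by omega),
      idle_pixels_py_alt_mod step (step % 8) (by omega)]
  exact idle_pixels_eq_on_residue _ h0 h8
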